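-- pv_equiv track=rewrite | github.com/cotucker/feedback-summarizer | services/text_chunking_service.py | clean_chunk
-- ===== SOURCE A (Python) =====
-- def clean_chunk(text: str) -> str:
--     text = text.strip()
--     text = text.strip(".,;:!?-")
--     start_stopwords = {
--         "and", "but", "or", "so", "plus", "yet", "nor",
--         "however", "therefore", "thus", "hence", "meanwhile",
--         "consequently", "furthermore", "moreover", "nonetheless",
--         "nevertheless", "otherwise", "instead", "besides", "also",
--         "whereas", "although", "though", "while", "since", "because"
--     }
--     parts = text.split(' ', 1)
--     if parts:
--         first_word = parts[0].lower().strip(".,")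
--         if first_word in start_stopwords:
--             text = parts[1] if len(parts) > 1 else ""
--             return clean_chunk(text)
--     return text.strip()
-- ===== SOURCE B (Python) =====
-- _PUNCT = ".,;:!?-"
-- _START_STOPWORDS = frozenset({
--     "and", "but", "or", "so", "plus", "yet", "nor",
--     "however", "therefore", "thus", "hence", "meanwhile",
--     "consequently", "furthermore", "moreover", "nonetheless",
--     "nevertheless", "otherwise", "instead", "besides", "also",
--     "whereas", "although", "though", "while", "since", "because"
-- })
--
--
-- def clean_chunk(text: str) -> str:
--     while True:
--         text = text.strip().strip(_PUNCT)
--         i = text.find(' ')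
--         head = text if i < 0 else text[:i]
--         if head.lower().strip(".,") not in _START_STOPWORDS:
--             return text.strip()
--         text = '' if i < 0 else text[i + 1:]
-- ===== Notes on version B (the rewrite author's own statement) =====
-- stated objective: alternative
-- what changed: Replaces A's tail recursion over split-into-two-parts and list indexing by an iterative while loop that locates the first space with str.find and slices the string directly.
import Mathlib
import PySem

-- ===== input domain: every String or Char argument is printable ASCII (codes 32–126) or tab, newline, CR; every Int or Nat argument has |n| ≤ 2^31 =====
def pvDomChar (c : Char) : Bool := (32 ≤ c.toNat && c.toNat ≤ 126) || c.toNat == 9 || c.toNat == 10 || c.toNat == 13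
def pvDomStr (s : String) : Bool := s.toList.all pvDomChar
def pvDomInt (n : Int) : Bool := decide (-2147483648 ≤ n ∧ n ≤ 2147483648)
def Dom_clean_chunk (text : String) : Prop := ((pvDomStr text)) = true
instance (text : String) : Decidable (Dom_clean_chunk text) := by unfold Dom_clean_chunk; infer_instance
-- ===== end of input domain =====

-- B replaces A's tail recursion over split-into-two-parts by a while loop that locates the first space
-- with find and slices the string; same cost, different decomposition (objective: alternative).

-- shared data: the stopword set literal both Pythons carry
def pvStartStopwords : PySem.Set String := PySem.Set.ofList
  ["and", "but", "or", "so", "plus", "yet", "nor",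
   "however", "therefore", "thus", "hence", "meanwhile",
   "consequently", "furthermore", "moreover", "nonetheless",
   "nevertheless", "otherwise", "instead", "besides", "also",
   "whereas", "although", "though", "while", "since", "because"]

-- ===== PORT A =====
-- A's recursion; each recursive call strictly shortens the string, so length+1 fuel is a pure
-- totality guard (the fuel-0 branch is unreachable).
def clean_chunk_go : Nat → String → String
  | 0, _ => ""
  | fuel+1, text =>
    let text1 := PySem.Str.strip text
    let text2 := PySem.Str.stripChars text1 ".,;:!?-"
    match PySem.Str.splitMax? text2 " " 1 with
    | none => PySem.Str.strip text2   -- unreachable: the separator " " is nonempty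
    | some parts =>
      if parts ≠ [] then
        let first_word := PySem.Str.stripChars (PySem.Str.lower ((PySem.List.pyGet? parts 0).getD "")) ".,"
        if first_word ∈ pvStartStopwords then
          clean_chunk_go fuel (if parts.length > 1 then (PySem.List.pyGet? parts 1).getD "" else "")
        else PySem.Str.strip text2
      else PySem.Str.strip text2

def clean_chunk (text : String) : String := clean_chunk_go (text.toList.length + 1) text

-- ===== PORT B =====
-- B's while loop; the string strictly shortens each iteration, so length+1 fuel is a pure
-- totality guard (the fuel-0 branch is unreachable).
def clean_chunk_loop : Nat → String → String
  | 0, _ => ""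
  | fuel+1, s =>
    let t := PySem.Str.stripChars (PySem.Str.strip s) ".,;:!?-"
    let i := PySem.Str.find t " "
    let head := if i < 0 then t else PySem.Str.slice t none (some i)
    if PySem.Str.stripChars (PySem.Str.lower head) ".," ∈ pvStartStopwords then
      clean_chunk_loop fuel (if i < 0 then "" else PySem.Str.slice t (some (i+1)) none)
    else PySem.Str.strip t

def clean_chunk_alt (text : String) : String := clean_chunk_loop (text.toList.length + 1) text

-- ===== PRECONDITION & SPEC =====
def Spec_clean_chunk (text : String) (out : String) : Prop := out = clean_chunk_alt text
instance (text : String) (out : String) : Decidable (Spec_clean_chunk text out) := by unfold Spec_clean_chunk; infer_instance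

-- ===== CLAIM (what is proved, stated in full; the proofs are below) =====
def Claim_equal_clean_chunk : Prop := ∀ (text : String), Dom_clean_chunk text → Spec_clean_chunk text (clean_chunk text)

-- ===== LEMMAS AND PROOFS =====

lemma pv_findgo_char (s : List Char) : ∀ k : Nat,
    PySem.Chars.find.go [' '] s k =
      if ' ' ∈ s then ((k : Int) + (s.takeWhile (· ≠ ' ')).length) else -1 := by
  induction s with
  | nil => intro k; simp [PySem.Chars.find.go]
  | cons c rest ih =>
    intro k
    simp only [PySem.Chars.find.go]
    by_cases hc : c = ' '
    · subst hc; simp [List.isPrefixOf]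
    · have hpre : ([' '] : List Char).isPrefixOf (c :: rest) = false := by
        simp [List.isPrefixOf, Ne.symm hc]
      rw [hpre]
      simp only [Bool.false_eq_true, if_false, ih (k+1)]
      by_cases hm : ' ' ∈ rest
      · simp [hm, hc, List.takeWhile_cons]
        push_cast
        ring
      · simp [hm, hc, Ne.symm hc]

lemma pv_find_char (s : List Char) :
    PySem.Chars.find s [' '] =
      if ' ' ∈ s then (((s.takeWhile (· ≠ ' ')).length : Int)) else -1 := by
  simpa using pv_findgo_char s 0

lemma pv_go_zero (fuel : Nat) (s cur : List Char) (acc : List (List Char)) (h : 0 < fuel) :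
    PySem.Chars.splitOnMax.go [' '] fuel 0 s cur acc = acc.reverse ++ [cur.reverse ++ s] := by
  obtain ⟨f, rfl⟩ : ∃ f, fuel = f + 1 := ⟨fuel - 1, by omega⟩
  cases s with
  | nil => simp [PySem.Chars.splitOnMax.go]
  | cons c rest => simp [PySem.Chars.splitOnMax.go]

lemma pv_go_one : ∀ (s : List Char) (fuel : Nat) (cur : List Char) (acc : List (List Char)),
    s.length < fuel →
    PySem.Chars.splitOnMax.go [' '] fuel 1 s cur acc =
      acc.reverse ++ (if ' ' ∈ s
        then [cur.reverse ++ s.takeWhile (· ≠ ' '), s.drop ((s.takeWhile (· ≠ ' ')).length + 1)]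
        else [cur.reverse ++ s]) := by
  intro s
  induction s with
  | nil =>
    intro fuel cur acc h
    obtain ⟨f, rfl⟩ : ∃ f, fuel = f + 1 := ⟨fuel - 1, by omega⟩
    simp [PySem.Chars.splitOnMax.go]
  | cons c rest ih =>
    intro fuel cur acc h
    obtain ⟨f, rfl⟩ : ∃ f, fuel = f + 1 := ⟨fuel - 1, by omega⟩
    have hf : rest.length < f := by simpa using Nat.lt_of_succ_lt_succ h
    simp only [PySem.Chars.splitOnMax.go]
    by_cases hc : c = ' '
    · subst hc
      have hpre : ([' '] : List Char).isPrefixOf (' ' :: rest) = true := by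
        simp [List.isPrefixOf]
      rw [hpre]
      simp only [if_true, Nat.one_ne_zero, if_false, List.length_singleton, List.drop_succ_cons,
        List.drop_zero]
      rw [pv_go_zero f rest [] (cur.reverse :: acc) (by omega)]
      simp
    · have hpre : ([' '] : List Char).isPrefixOf (c :: rest) = false := by
        simp [List.isPrefixOf, Ne.symm hc]
      rw [hpre]
      simp only [Nat.one_ne_zero, if_false, Bool.false_eq_true]
      rw [ih f (c :: cur) acc hf]
      by_cases hm : ' ' ∈ rest
      · simp [hm, hc]
      · simp [hm, Ne.symm hc]

lemma pv_split_one (s : List Char) :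
    PySem.Chars.splitOnMax s [' '] 1 =
      if ' ' ∈ s
        then [s.takeWhile (· ≠ ' '), s.drop ((s.takeWhile (· ≠ ' ')).length + 1)]
        else [s] := by
  have h1 : ¬ ((1 : Int) < 0) := by norm_num
  simp only [PySem.Chars.splitOnMax, h1, if_false]
  rw [show (1 : Int).toNat = 1 from rfl, pv_go_one s (s.length + 1) [] [] (by omega)]
  simp

lemma pv_strsplit (t : String) :
    PySem.Str.splitMax? t " " 1 =
      some (if ' ' ∈ t.toList
        then [String.ofList (t.toList.takeWhile (· ≠ ' ')),
              String.ofList (t.toList.drop ((t.toList.takeWhile (· ≠ ' ')).length + 1))]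
        else [t]) := by
  simp only [PySem.Str.splitMax?, PySem.Chars.splitMax?,
    show (" " : String).toList = [' '] from rfl]
  rw [pv_split_one]
  by_cases hm : ' ' ∈ t.toList <;> simp [hm]

lemma pv_strfind (t : String) :
    PySem.Str.find t " " =
      if ' ' ∈ t.toList then (((t.toList.takeWhile (· ≠ ' ')).length : Int)) else -1 := by
  simp only [PySem.Str.find, show (" " : String).toList = [' '] from rfl]
  exact pv_find_char t.toList

lemma pv_take_takeWhile (t : List Char) :
    t.take ((t.takeWhile (· ≠ ' ')).length) = t.takeWhile (· ≠ ' ') :=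
  (List.prefix_iff_eq_take.mp (List.takeWhile_prefix _)).symm

lemma pv_go_eq_loop : ∀ (fuel : Nat) (s : String),
    clean_chunk_go fuel s = clean_chunk_loop fuel s := by
  intro fuel
  induction fuel with
  | zero => intro s; rfl
  | succ f ih =>
    intro s
    simp only [clean_chunk_go, clean_chunk_loop]
    set t := PySem.Str.stripChars (PySem.Str.strip s) ".,;:!?-" with ht
    rw [pv_strsplit t, pv_strfind t]
    by_cases hm : ' ' ∈ t.toList
    · set tw := t.toList.takeWhile (· ≠ ' ') with htw
      set rest := t.toList.drop (tw.length + 1) with hrest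
      have hnotlt : ¬ ((tw.length : Int) < 0) := by omega
      have hhead : PySem.Str.slice t none (some (tw.length : Int)) = String.ofList tw := by
        simp only [PySem.Str.slice, PySem.Chars.slice_eq_listSlice,
          PySem.List.slice_to _ (by omega : (0:Int) ≤ (tw.length : Int)),
          Int.toNat_natCast]
        rw [htw, pv_take_takeWhile]
      have hrest' : PySem.Str.slice t (some ((tw.length : Int) + 1)) none = String.ofList rest := by
        simp only [PySem.Str.slice, PySem.Chars.slice_eq_listSlice,
          PySem.List.slice_from _ (by omega : (0:Int) ≤ (tw.length : Int) + 1)]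
        rw [show ((tw.length : Int) + 1).toNat = tw.length + 1 by omega]
      simp only [hm, if_true, hnotlt, if_false, hhead, hrest']
      have hget0 : (PySem.List.pyGet? [String.ofList tw, String.ofList rest] 0).getD "" =
          String.ofList tw := rfl
      have hget1 : (PySem.List.pyGet? [String.ofList tw, String.ofList rest] 1).getD "" =
          String.ofList rest := rfl
      simp only [hget0, hget1, ne_eq, List.cons_ne_nil, not_false_iff, if_true,
        List.length_cons, List.length_nil]
      norm_num
      split_ifs with hstop
      · exact ih _
      · rfl
    · have hlt : ((-1 : Int) < 0) := by norm_num
      simp only [hm, if_false, if_true, hlt]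
      have hget0 : (PySem.List.pyGet? [t] 0).getD "" = t := rfl
      simp only [hget0, ne_eq, List.cons_ne_nil, not_false_iff, if_true,
        List.length_singleton]
      norm_num
      split_ifs with hstop
      · exact ih _
      · rfl

-- ===== VERDICT (by name: the statement is the Claim_ definition above) =====
theorem clean_chunk_spec : Claim_equal_clean_chunk := by
  intro text _
  unfold Spec_clean_chunk clean_chunk clean_chunk_alt
  exact pv_go_eq_loop _ _
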